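-- pv_equiv track=rewrite | github.com/aschotte/Cryptide | CyptideGUI.py | get_cubepos_bycolor
-- ===== SOURCE A (Python) =====
-- def get_cubepos_bycolor(cubes):
--     dico={}
--     for k,v in cubes.items():
--         if v['color'] in dico:
--             dico[v['color']].append(k)
--         else:
--             dico[v['color']]=[k]
--     return dico
-- ===== SOURCE B (Python) =====
-- def get_cubepos_bycolor(cubes):
--     # Two-pass grouping: first collect the distinct colors in first-occurrence
--     # order, then build each color's key list with a filtering comprehension.
--     items = list(cubes.items())
--     colors = []
--     for _, v in items:
--         if v['color'] not in colors:
--             colors.append(v['color'])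
--     return {c: [k for k, v in items if v['color'] == c] for c in colors}
-- ===== Notes on version B (the rewrite author's own statement) =====
-- stated objective: alternative
-- what changed: A builds the groups in one pass by mutating a hash dict entry per cube; B first dedups the color list in first-occurrence order, then builds each group by a separate filtering pass over the items.
import Mathlib
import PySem

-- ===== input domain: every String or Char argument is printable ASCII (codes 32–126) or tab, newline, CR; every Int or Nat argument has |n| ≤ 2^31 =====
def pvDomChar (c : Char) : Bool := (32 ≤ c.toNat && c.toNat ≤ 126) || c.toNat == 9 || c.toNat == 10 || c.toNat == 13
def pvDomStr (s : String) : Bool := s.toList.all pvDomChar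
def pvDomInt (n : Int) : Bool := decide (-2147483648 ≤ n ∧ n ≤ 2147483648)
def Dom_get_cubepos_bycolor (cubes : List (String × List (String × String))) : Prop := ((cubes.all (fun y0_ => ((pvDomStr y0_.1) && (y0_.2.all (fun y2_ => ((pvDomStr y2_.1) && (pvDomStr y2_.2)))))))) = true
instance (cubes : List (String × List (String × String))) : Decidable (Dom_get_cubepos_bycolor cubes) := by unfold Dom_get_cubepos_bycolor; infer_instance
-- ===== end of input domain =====

-- B changes the decomposition (distinct-colors pass + one filtering pass per color
-- instead of A's single pass mutating a dict entry per cube); same return value.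

-- v['color'] for an inner dict given as an association list (Pre_ guarantees the
-- key is present and the inner keys are unique, so first-match lookup is Python's)
def pvColor (v : List (String × String)) : String :=
  (PySem.Dict.mk v).getD "color" ""

-- ===== PORT A =====
def get_cubepos_bycolor (cubes : List (String × List (String × String))) : List (String × List String) :=
  (cubes.foldl (fun dico kv =>
      if dico.contains (pvColor kv.2) then
        dico.modify (pvColor kv.2) [] (fun l => l ++ [kv.1])   -- dico[c].append(k)
      else
        dico.insert (pvColor kv.2) [kv.1])                     -- dico[c] = [k]
    PySem.Dict.empty).items

-- ===== PORT B =====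
def get_cubepos_bycolor_alt (cubes : List (String × List (String × String))) : List (String × List String) :=
  let colors := cubes.foldl (fun acc kv =>
      if pvColor kv.2 ∈ acc then acc else acc ++ [pvColor kv.2]) []
  colors.map (fun c => (c, (cubes.filter (fun kv => pvColor kv.2 == c)).map Prod.fst))

-- ===== PRECONDITION & SPEC =====
-- Pre_ excludes inputs on which Python A raises KeyError ('color' missing from an
-- inner dict) and association lists with duplicate keys, which do not represent a
-- Python dict at all (the dict encoding assumes unique keys).
def Pre_get_cubepos_bycolor (cubes : List (String × List (String × String))) : Prop :=
  (cubes.map Prod.fst).Nodup ∧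
  ∀ p ∈ cubes, (p.2.map Prod.fst).Nodup ∧ "color" ∈ p.2.map Prod.fst
instance (cubes : List (String × List (String × String))) : Decidable (Pre_get_cubepos_bycolor cubes) := by unfold Pre_get_cubepos_bycolor; infer_instance
def pvWitness_get_cubepos_bycolor : (List (String × List (String × String))) :=
  [("c1", [("color", "red")]), ("c2", [("color", "blue"), ("size", "2")]), ("c3", [("color", "red")])]

def Spec_get_cubepos_bycolor (cubes : List (String × List (String × String))) (out : List (String × List String)) : Prop := out = get_cubepos_bycolor_alt cubes
instance (cubes : List (String × List (String × String))) (out : List (String × List String)) : Decidable (Spec_get_cubepos_bycolor cubes out) := by unfold Spec_get_cubepos_bycolor; infer_instance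

-- ===== CLAIM (what is proved, stated in full; the proofs are below) =====
def Claim_equal_get_cubepos_bycolor : Prop := ∀ (cubes : List (String × List (String × String))), Dom_get_cubepos_bycolor cubes → Pre_get_cubepos_bycolor cubes → Spec_get_cubepos_bycolor cubes (get_cubepos_bycolor cubes)

-- ===== LEMMAS AND PROOFS =====

-- A's branching step is exactly Python's d.modify (both branches set d[c] to
-- (d.get(c, []) ++ [k])).
theorem stepA_eq_modify (d : PySem.Dict String (List String)) (kv : String × List (String × String)) :
    (if d.contains (pvColor kv.2) then
        d.modify (pvColor kv.2) [] (fun l => l ++ [kv.1])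
      else
        d.insert (pvColor kv.2) [kv.1])
    = d.modify (pvColor kv.2) [] (fun l => l ++ [kv.1]) := by
  by_cases h : d.contains (pvColor kv.2) = true
  · simp [h]
  · have hb : d.contains (pvColor kv.2) = false := by simpa using h
    simp [hb, PySem.Dict.modify, PySem.Dict.getD_of_not_contains d [] hb]

-- the dict A's loop builds, in the canonical modify form
def pvFoldA (cubes : List (String × List (String × String))) : PySem.Dict String (List String) :=
  cubes.foldl (fun d kv => d.modify (pvColor kv.2) [] (fun l => l ++ [kv.1])) PySem.Dict.empty

theorem foldA_keys (cubes : List (String × List (String × String))) :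
    (pvFoldA cubes).keys = PySem.Set.ofList (cubes.map (fun kv => pvColor kv.2)) := by
  have h := PySem.Dict.keys_foldl_modify_key cubes (fun kv => pvColor kv.2) ([] : List String)
    (fun _ kv => (fun l => l ++ [kv.1])) PySem.Dict.empty
  simpa [pvFoldA, PySem.Set.update_nil_left, PySem.Dict.keys_empty] using h

theorem foldA_getD (cubes : List (String × List (String × String))) (c : String) :
    (pvFoldA cubes).getD c []
      = (cubes.filter (fun kv => pvColor kv.2 == c)).map Prod.fst := by
  have h1 := PySem.Dict.getD_foldl_modify_append (cubes.map (fun kv => (pvColor kv.2, kv.1)))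
    PySem.Dict.empty c
  rw [List.foldl_map] at h1
  simpa [pvFoldA, List.filter_map, Function.comp_def, PySem.Dict.getD_empty] using h1

theorem colorsB_eq (cubes : List (String × List (String × String))) :
    (cubes.foldl (fun acc kv => if pvColor kv.2 ∈ acc then acc else acc ++ [pvColor kv.2]) [])
      = PySem.Set.ofList (cubes.map (fun kv => pvColor kv.2)) := by
  have h : (fun (acc : List String) kv => if pvColor kv.2 ∈ acc then acc else acc ++ [pvColor kv.2])
      = (fun acc (kv : String × List (String × String)) => PySem.Set.add acc (pvColor kv.2)) := by
    funext acc kv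
    rw [PySem.Set.add_eq_ite]
  rw [h, ← PySem.Set.update_map_eq_foldl_add, PySem.Set.update_nil_left]

-- ===== VERDICT (by name: the statement is the Claim_ definition above) =====
theorem get_cubepos_bycolor_spec : Claim_equal_get_cubepos_bycolor := by
  intro cubes _ _
  show get_cubepos_bycolor cubes = get_cubepos_bycolor_alt cubes
  unfold get_cubepos_bycolor get_cubepos_bycolor_alt
  have hstep : (fun (dico : PySem.Dict String (List String)) kv =>
      if dico.contains (pvColor kv.2) then
        dico.modify (pvColor kv.2) [] (fun l => l ++ [kv.1])
      else
        dico.insert (pvColor kv.2) [kv.1])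
      = (fun d (kv : String × List (String × String)) =>
          d.modify (pvColor kv.2) [] (fun l => l ++ [kv.1])) := by
    funext d kv; exact stepA_eq_modify d kv
  rw [hstep]
  have hnd : (pvFoldA cubes).keys.Nodup := by
    unfold pvFoldA
    have h := PySem.Dict.nodup_keys_foldl_modify_key cubes (fun kv => pvColor kv.2) ([] : List String)
      (fun _ kv => (fun l => l ++ [kv.1])) PySem.Dict.empty (by simp [PySem.Dict.keys_empty])
    simpa using h
  have := PySem.Dict.items_eq_map_keys (pvFoldA cubes) hnd ([] : List String)
  rw [show (cubes.foldl (fun d kv => d.modify (pvColor kv.2) [] (fun l => l ++ [kv.1])) PySem.Dict.empty) = pvFoldA cubes from rfl]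
  rw [this, foldA_keys, colorsB_eq]
  apply List.map_congr_left
  intro c _
  rw [foldA_getD]
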